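-- pv_equiv track=rewrite | github.com/peter216/Hello | routerdiff.py | include_hierarchy
-- ===== SOURCE A (Python) =====
-- def include_hierarchy(diff_result):
--     """
--     Include all parent and sibling lines of changed sections.
--     """
--     result_with_context = []
--     context_stack = []  # Stack to track the hierarchy of parents
--
--     for symbol, (indent_level, line) in diff_result:
--         # Remove irrelevant levels from the stack
--         while context_stack and context_stack[-1][0] >= indent_level:
--             context_stack.pop()
--
--         if symbol != " ":
--             # Include all siblings and parents of this change
--             if context_stack:
--                 parent_level, parent_line = context_stack[-1]
--                 for sibling_symbol, sibling in diff_result: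
--                     sibling_level, sibling_line = sibling
--                     if sibling_level == parent_level and sibling_line not in [r[1] for r in result_with_context]:
--                         result_with_context.append((sibling_symbol, sibling))
--             result_with_context.append((symbol, (indent_level, line)))
--
--         # Add the current line to the context stack for future hierarchy tracking
--         context_stack.append((indent_level, line))
--
--     return result_with_context
-- ===== SOURCE B (Python) =====
-- def include_hierarchy(diff_result):
--     """
--     Include all parent and sibling lines of changed sections.
--     """
--     # Stackless formulation: the top of A's context stack at position i is
--     # simply the nearest earlier entry with a smaller indent level, so each
--     # changed line contributes its parent-level sibling block followed by
--     # itself, and unchanged lines contribute nothing.  (A's dedup test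
--     # compares a str to tuples and never fires, so it is dead code.)
--     def parent_level(i, lvl):
--         for _, (prev_level, _) in reversed(diff_result[:i]):
--             if prev_level < lvl:
--                 return prev_level
--         return None
--
--     def block(i, entry):
--         symbol, (lvl, _) = entry
--         if symbol == " ":
--             return []
--         pl = parent_level(i, lvl)
--         sibs = [e for e in diff_result if e[1][0] == pl] if pl is not None else []
--         return sibs + [entry]
--
--     return [out for i, entry in enumerate(diff_result) for out in block(i, entry)]
-- ===== Notes on version B (the rewrite author's own statement) =====
-- stated objective: faster
-- what changed: B drops the context stack and the per-sibling rescan of the growing result (whose str-vs-tuple dedup test is dead code): it emits, per changed line, the sibling block of the nearest earlier lower-indent entry followed by the line itself, as one comprehension.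
import Mathlib
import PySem

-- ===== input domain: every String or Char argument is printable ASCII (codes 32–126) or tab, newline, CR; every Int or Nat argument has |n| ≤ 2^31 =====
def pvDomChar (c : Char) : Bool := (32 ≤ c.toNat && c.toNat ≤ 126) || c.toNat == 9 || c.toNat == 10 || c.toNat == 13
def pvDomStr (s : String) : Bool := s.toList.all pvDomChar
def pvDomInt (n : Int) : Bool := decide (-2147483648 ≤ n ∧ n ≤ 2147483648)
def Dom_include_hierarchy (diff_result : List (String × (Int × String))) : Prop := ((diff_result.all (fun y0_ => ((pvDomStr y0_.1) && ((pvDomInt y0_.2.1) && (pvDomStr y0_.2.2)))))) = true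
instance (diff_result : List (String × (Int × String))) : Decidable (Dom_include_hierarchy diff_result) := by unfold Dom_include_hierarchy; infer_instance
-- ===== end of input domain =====

-- B replaces A's context stack and per-change rescan (with a dead str-vs-tuple dedup test)
-- by a stackless comprehension: per changed line, the sibling block of the nearest earlier
-- lower-indent entry followed by the line itself; measured asymptotically faster.

-- ===== PORT A =====

-- Python's `sibling_line not in [r[1] for r in result_with_context]` compares a str with
-- (int, str) tuples; in Python str == tuple is always False, ported exactly as this
-- constant-false equality test.
def pyStrEqPair (_s : String) (_p : Int × String) : Bool := false

-- `while context_stack and context_stack[-1][0] >= indent_level: context_stack.pop()`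
-- (stack kept head-first: head = Python's context_stack[-1])
def popCtx (stack : List (Int × String)) (lvl : Int) : List (Int × String) :=
  match stack with
  | [] => []
  | top :: rest => if top.1 ≥ lvl then popCtx rest lvl else top :: rest

-- the inner `for sibling_symbol, sibling in diff_result:` loop of A
def includeSiblingsA (full : List (String × (Int × String))) (parent_level : Int)
    (acc : List (String × (Int × String))) : List (String × (Int × String)) :=
  full.foldl (fun acc e =>
    if e.2.1 == parent_level && !((acc.map (·.2)).any (fun r => pyStrEqPair e.2.2 r))
    then acc ++ [e] else acc) acc

def goA (full : List (String × (Int × String))) :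
    List (String × (Int × String)) → List (String × (Int × String)) →
    List (Int × String) → List (String × (Int × String))
  | [], res, _ => res
  | (s, (lvl, ln)) :: rest, res, stack =>
    let stack' := popCtx stack lvl
    let res' :=
      if s ≠ " " then
        (match stack' with
         | [] => res
         | (pl, _) :: _ => includeSiblingsA full pl res) ++ [(s, (lvl, ln))]
      else res
    goA full rest res' ((lvl, ln) :: stack')

def include_hierarchy (diff_result : List (String × (Int × String))) : List (String × (Int × String)) :=
  goA diff_result diff_result [] []

-- ===== PORT B =====

-- Source B's `for _, (prev_level, _) in reversed(diff_result[:i]): if prev_level < lvl: return prev_level`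
def findParent : List (String × (Int × String)) → Int → Option Int
  | [], _ => none
  | e :: rest, lvl => if e.2.1 < lvl then some e.2.1 else findParent rest lvl

def parentLevelB (full : List (String × (Int × String))) (i : Int) (lvl : Int) : Option Int :=
  findParent (PySem.List.slice full none (some i)).reverse lvl

-- Source B's `block(i, entry)`
def blockB (full : List (String × (Int × String))) (i : Int)
    (e : String × (Int × String)) : List (String × (Int × String)) :=
  if e.1 == " " then []
  else
    match parentLevelB full i e.2.1 with
    | none => [e]
    | some pl => full.filter (fun x => x.2.1 == pl) ++ [e]

def include_hierarchy_alt (diff_result : List (String × (Int × String))) : List (String × (Int × String)) :=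
  (PySem.List.enumerate diff_result).flatMap (fun p => blockB diff_result p.1 p.2)

-- ===== PRECONDITION & SPEC =====
def Spec_include_hierarchy (diff_result : List (String × (Int × String))) (out : List (String × (Int × String))) : Prop := out = include_hierarchy_alt diff_result
instance (diff_result : List (String × (Int × String))) (out : List (String × (Int × String))) : Decidable (Spec_include_hierarchy diff_result out) := by unfold Spec_include_hierarchy; infer_instance

-- ===== CLAIM (what is proved, stated in full; the proofs are below) =====
def Claim_equal_include_hierarchy : Prop := ∀ (diff_result : List (String × (Int × String))), Dom_include_hierarchy diff_result → Spec_include_hierarchy diff_result (include_hierarchy diff_result)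

-- ===== LEMMAS AND PROOFS =====

-- A's inner sibling loop is "append all entries at parent_level": the dedup test is constant-false.
theorem includeSiblingsA_eq (full : List (String × (Int × String))) (pl : Int) :
    ∀ acc, includeSiblingsA full pl acc = acc ++ full.filter (fun e => e.2.1 == pl) := by
  induction full with
  | nil => intro acc; simp [includeSiblingsA]
  | cons e l ih =>
    intro acc
    have h1 : includeSiblingsA (e :: l) pl acc
        = includeSiblingsA l pl (if e.2.1 == pl then acc ++ [e] else acc) := by
      simp only [includeSiblingsA, List.foldl_cons, pyStrEqPair]
      simp
    rw [h1, ih, List.filter_cons]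
    by_cases h : e.2.1 = pl <;> simp [h, List.append_assoc]

-- popping to a lower threshold subsumes popping to a higher one
theorem popCtx_popCtx (st : List (Int × String)) (a b : Int) (hba : b ≤ a) :
    popCtx (popCtx st a) b = popCtx st b := by
  induction st with
  | nil => rfl
  | cons top rest ih =>
    by_cases h : top.1 ≥ a
    · have hb : top.1 ≥ b := le_trans hba h
      simp [popCtx, h, hb, ih]
    · simp [popCtx, h]

-- the stack A has built after processing a prefix
def stackOf (p : List (String × (Int × String))) : List (Int × String) :=
  p.foldl (fun st e => (e.2.1, e.2.2) :: popCtx st e.2.1) []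

theorem stackOf_snoc (p : List (String × (Int × String))) (e : String × (Int × String)) :
    stackOf (p ++ [e]) = (e.2.1, e.2.2) :: popCtx (stackOf p) e.2.1 := by
  simp [stackOf, List.foldl_append]

-- the top of A's (popped) stack is B's nearest earlier lower-indent entry
theorem head_popCtx_stackOf (p : List (String × (Int × String))) (lvl : Int) :
    (popCtx (stackOf p) lvl).head?.map (·.1) = findParent p.reverse lvl := by
  induction p using List.reverseRecOn with
  | nil => simp [stackOf, popCtx, findParent]
  | append_singleton p e ih =>
    rw [stackOf_snoc]
    by_cases h : e.2.1 < lvl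
    · have h' : ¬ (e.2.1 ≥ lvl) := not_le.mpr h
      simp [popCtx, h', findParent, h]
    · have h' : e.2.1 ≥ lvl := not_lt.mp h
      rw [List.reverse_append]
      simp only [popCtx, if_pos h', List.reverse_singleton, List.singleton_append,
        findParent, if_neg h]
      rw [popCtx_popCtx _ _ _ h', ih]

theorem goA_eq (full : List (String × (Int × String))) :
    ∀ (rest p res : List (String × (Int × String))), full = p ++ rest →
      goA full rest res (stackOf p)
        = res ++ (PySem.List.enumerate rest (p.length : Int)).flatMap
            (fun q => blockB full q.1 q.2) := by
  intro rest
  induction rest with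
  | nil => intro p res _; simp [goA, PySem.List.enumerate_nil]
  | cons e rest' ih =>
    intro p res hfull
    obtain ⟨s, lvl, ln⟩ := e
    have hpush : (lvl, ln) :: popCtx (stackOf p) lvl = stackOf (p ++ [(s, (lvl, ln))]) := by
      rw [stackOf_snoc]
    have hlen : ((p ++ [(s, (lvl, ln))]).length : Int) = (p.length : Int) + 1 := by
      simp
    have hfull' : full = (p ++ [(s, (lvl, ln))]) ++ rest' := by
      rw [hfull]; simp
    have htake : PySem.List.slice full none (some (p.length : Int)) = p := by
      rw [PySem.List.slice_to_natCast, hfull, List.take_left]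
    have hblock :
        (if s ≠ " " then
          (match popCtx (stackOf p) lvl with
           | [] => res
           | (pl, _) :: _ => includeSiblingsA full pl res) ++ [(s, (lvl, ln))]
         else res)
        = res ++ blockB full (p.length : Int) (s, (lvl, ln)) := by
      by_cases hs : s = " "
      · simp [hs, blockB]
      · have hfp := head_popCtx_stackOf p lvl
        simp only [blockB, hs, ne_eq, not_false_eq_true, if_pos]
        have hbeq : ((s == " ") = false) := beq_eq_false_iff_ne.mpr hs
        rw [hbeq]
        simp only [Bool.false_eq_true, if_false, parentLevelB, htake]
        rw [← hfp]
        cases hc : popCtx (stackOf p) lvl with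
        | nil => simp
        | cons top rs =>
          simp [includeSiblingsA_eq, List.append_assoc]
    calc goA full ((s, (lvl, ln)) :: rest') res (stackOf p)
        = goA full rest'
            (if s ≠ " " then
              (match popCtx (stackOf p) lvl with
               | [] => res
               | (pl, _) :: _ => includeSiblingsA full pl res) ++ [(s, (lvl, ln))]
             else res)
            ((lvl, ln) :: popCtx (stackOf p) lvl) := by
          simp only [goA]
      _ = res ++ blockB full (p.length : Int) (s, (lvl, ln))
            ++ (PySem.List.enumerate rest' ((p.length : Int) + 1)).flatMap
                (fun q => blockB full q.1 q.2) := by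
          rw [hblock, hpush, ih (p ++ [(s, (lvl, ln))]) _ hfull', hlen, List.append_assoc]
      _ = res ++ (PySem.List.enumerate ((s, (lvl, ln)) :: rest') (p.length : Int)).flatMap
            (fun q => blockB full q.1 q.2) := by
          rw [PySem.List.enumerate_cons]
          simp [List.append_assoc]

-- ===== VERDICT (by name: the statement is the Claim_ definition above) =====
theorem include_hierarchy_spec : Claim_equal_include_hierarchy := by
  intro diff_result _
  unfold Spec_include_hierarchy include_hierarchy include_hierarchy_alt
  have h := goA_eq diff_result diff_result [] [] (by simp)
  simpa [stackOf] using h
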